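-- pv_equiv track=rewrite | github.com/LuninaPolina/SecondaryStructureAnalyzer | secondary-structure-prediction/scripts/align.py | img2dot
-- ===== SOURCE A (Python) =====
-- def img2dot(img):
--     def binarize_output(img, coeff=0.25):
--         size = len(img)
--         for i in range(size):
--             for j in range(size):
--                 if i != j:
--                     if img[i][j] > 255 * coeff:
--                         img[i][j] = 255
--                     else:
--                         img[i][j] = 0
--                 else:
--                     img[i][j] = max(32, min(128, round(float(img[i][j]) / 32) * 32))
--         return img
--
--     def get_dot(img):
--         codes = {32: 'A', 64: 'C', 96: 'G', 128: 'U'}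
--         size = len(img)
--         coords = []
--         seq = ''
--         for i in range(size):
--             for j in range(size):
--                 if i == j and img[i][j] != 0:
--                     seq += codes[img[i][j]]
--                 if img[i][j] == 255 and i != j:
--                     coords.append((min(i, j), max(i, j)))
--         coords = set(coords)
--         dot = ['.' for i in range(size)]
--         for coord in coords:
--             if dot[coord[0]] != "." or dot[coord[1]] != ".":
--                 continue
--             if dot[coord[0]] == '.':
--                 dot[coord[0]] = '('
--             if dot[coord[1]] == '.':
--                 dot[coord[1]] = ')'
--         return seq, ''.join(dot)
--     return get_dot(binarize_output(img))
-- ===== SOURCE B (Python) =====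
-- def img2dot(img):
--     # One direct pass: sequence from the diagonal, brackets by a greedy
--     # lexicographic scan of the upper triangle (no binarize pass, no coords
--     # set, img is not mutated).
--     size = len(img)
--     seq_chars = []
--     for i in range(size):
--         k = round(img[i][i] / 32)
--         if k < 1:
--             k = 1
--         if k > 4:
--             k = 4
--         seq_chars.append("ACGU"[k - 1])
--     dot = ["."] * size
--     for i in range(size):
--         for j in range(i + 1, size):
--             if (img[i][j] > 63 or img[j][i] > 63) and dot[i] == "." and dot[j] == ".":
--                 dot[i] = "("
--                 dot[j] = ")"
--     return "".join(seq_chars), "".join(dot)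
-- ===== Notes on version B (the rewrite author's own statement) =====
-- stated objective: alternative
-- what changed: Replaces A's two full-matrix passes (in-place binarize pass, then a coords-list/set pass plus a set-driven bracket loop) with one direct computation: the sequence is read straight off the diagonal and the brackets come from a single greedy lexicographic scan of the upper triangle, with no mutation, no intermediate matrix and no set.
import Mathlib
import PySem

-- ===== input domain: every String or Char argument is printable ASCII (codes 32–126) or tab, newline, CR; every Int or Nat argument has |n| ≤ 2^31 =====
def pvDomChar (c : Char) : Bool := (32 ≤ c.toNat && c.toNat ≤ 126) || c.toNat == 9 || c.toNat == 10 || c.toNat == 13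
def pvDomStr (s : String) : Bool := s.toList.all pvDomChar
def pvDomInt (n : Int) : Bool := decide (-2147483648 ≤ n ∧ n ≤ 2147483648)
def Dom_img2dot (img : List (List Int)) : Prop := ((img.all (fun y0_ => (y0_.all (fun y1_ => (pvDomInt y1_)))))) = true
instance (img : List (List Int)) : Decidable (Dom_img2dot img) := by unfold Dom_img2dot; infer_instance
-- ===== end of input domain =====

-- B computes the same (sequence, dot-bracket) pair in one direct pass (no binarize pass, no
-- coords set, no intermediate matrix); A mutates img in place — the equivalence proved here is
-- about the RETURN value only (B does not mutate its argument).

-- Shared float primitive: models Python's round(v / 32) EXACTLY for |v| ≤ 2^31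
-- (v/32 is exact in binary floating point, and Python rounds halves to even).
def pyRoundDiv32 (v : Int) : Int :=
  let q := PySem.Int.floordiv v 32
  let r := PySem.Int.mod v 32
  if r < 16 then q else if 16 < r then q + 1 else if q % 2 = 0 then q else q + 1

-- ===== PORT A =====
-- m[i][j]; the default is never read under Pre_ (square matrix)
def pvEntry (m : List (List Int)) (i j : Nat) : Int := (m.getD i []).getD j 0

-- binarize_output: builds the mutated matrix (Python mutates img in place)
def pvBinarize (img : List (List Int)) : List (List Int) :=
  let size := img.length
  (List.range size).map (fun i => (List.range size).map (fun j =>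
    if i ≠ j then
      (if 63 < pvEntry img i j then 255 else 0)   -- img[i][j] > 255*0.25 ⟺ 63 < entry, on Int
    else
      max 32 (min 128 (pyRoundDiv32 (pvEntry img i j) * 32))))

def pvCodes : PySem.Dict Int Char := PySem.Dict.ofList [(32, 'A'), (64, 'C'), (96, 'G'), (128, 'U')]

-- body of the seq/coords collection loop of get_dot
def pvStepA (img : List (List Int)) (i : Nat) (acc : List (Nat × Nat) × List Char)
    (j : Nat) : List (Nat × Nat) × List Char :=
  let v := pvEntry img i j
  -- KeyError is unreachable: diagonal entries lie in {32, 64, 96, 128}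
  let acc := if i = j ∧ v ≠ 0 then (acc.1, acc.2 ++ [(PySem.Dict.get? pvCodes v).getD ' ']) else acc
  if v = 255 ∧ i ≠ j then (acc.1 ++ [(min i j, max i j)], acc.2) else acc

-- the seq/coords collection loop of get_dot
def pvLoopA (img : List (List Int)) (size : Nat) : List (Nat × Nat) × List Char :=
  (List.range size).foldl (fun acc i => (List.range size).foldl (pvStepA img i) acc) ([], [])

-- body of the bracket-assignment loop of get_dot
def pvDotStepA (dot : List Char) (c : Nat × Nat) : List Char :=
  if dot.getD c.1 ' ' ≠ '.' ∨ dot.getD c.2 ' ' ≠ '.' then dot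
  else
    let dot := if dot.getD c.1 ' ' = '.' then dot.set c.1 '(' else dot
    if dot.getD c.2 ' ' = '.' then dot.set c.2 ')' else dot

-- the bracket-assignment loop of get_dot
def pvDotLoopA (coords : List (Nat × Nat)) (size : Nat) : List Char :=
  coords.foldl pvDotStepA (List.replicate size '.')

def img2dot (img0 : List (List Int)) : String × String :=
  let img := pvBinarize img0
  let size := img.length
  let cs := pvLoopA img size
  -- CPython iterates the set in hash order; Pre_ makes the bracket loop order-independent
  let coords : PySem.Set (Nat × Nat) := PySem.Set.ofList cs.1
  (String.mk cs.2, String.mk (pvDotLoopA coords size))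

-- ===== PORT B =====
def pvSeqB (img : List (List Int)) : List Char :=
  (List.range img.length).map (fun i =>
    let k := pyRoundDiv32 ((img.getD i []).getD i 0)
    let k := if k < 1 then 1 else k
    let k := if 4 < k then 4 else k
    (['A', 'C', 'G', 'U']).getD (k - 1).toNat ' ')   -- "ACGU"[k-1] with k ∈ [1,4]

-- body of the upper-triangle bracket scan
def pvDotStepB (img : List (List Int)) (i : Nat) (dot : List Char) (j : Nat) : List Char :=
  if (63 < (img.getD i []).getD j 0 ∨ 63 < (img.getD j []).getD i 0)
      ∧ dot.getD i ' ' = '.' ∧ dot.getD j ' ' = '.' then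
    (dot.set i '(').set j ')'
  else dot

def pvDotB (img : List (List Int)) : List Char :=
  (List.range img.length).foldl (fun dot i =>
    (List.range' (i + 1) (img.length - (i + 1))).foldl (pvDotStepB img i) dot)
    (List.replicate img.length '.')

def img2dot_alt (img : List (List Int)) : String × String :=
  (String.mk (pvSeqB img), String.mk (pvDotB img))

-- ===== PRECONDITION & SPEC =====
-- cell pair {i,j} contributes a base pair after binarization
def pvActive (img : List (List Int)) (i j : Nat) : Bool :=
  (63 < (img.getD i []).getD j 0) || (63 < (img.getD j []).getD i 0)

-- Pre_ excludes (a) non-square inputs, on which A raises IndexError, and (b) matrices in which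
-- two distinct base pairs share an index, on which A's bracket layout depends on CPython's
-- accidental set iteration order (neither layout is more correct than the other).
def Pre_img2dot (img : List (List Int)) : Prop :=
  (∀ row ∈ img, img.length ≤ row.length) ∧
  ∀ i ∈ List.range img.length, ∀ j ∈ List.range img.length,
    ∀ k ∈ List.range img.length, ∀ l ∈ List.range img.length,
      i < j → k < l → (i, j) ≠ (k, l) → pvActive img i j = true → pvActive img k l = true →
      i ≠ k ∧ i ≠ l ∧ j ≠ k ∧ j ≠ l

instance (img : List (List Int)) : Decidable (Pre_img2dot img) := by
  unfold Pre_img2dot; infer_instance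

def pvWitness_img2dot : List (List Int) := [[100, 64], [0, 40]]

def Spec_img2dot (img : List (List Int)) (out : String × String) : Prop := out = img2dot_alt img
instance (img : List (List Int)) (out : String × String) : Decidable (Spec_img2dot img out) := by
  unfold Spec_img2dot; infer_instance

-- ===== CLAIM (what is proved, stated in full; the proofs are below) =====
def Claim_equal_img2dot : Prop :=
  ∀ (img : List (List Int)), Dom_img2dot img → Pre_img2dot img → Spec_img2dot img (img2dot img)

-- ===== LEMMAS AND PROOFS =====

theorem img2dot_witness_ok : Dom_img2dot pvWitness_img2dot ∧ Pre_img2dot pvWitness_img2dot := by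
  constructor <;> decide

-- ---- generic list lemmas ----

theorem pv_getD_eq_getElem {α : Type} {l : List α} {i : Nat} (h : i < l.length) (d : α) :
    l.getD i d = l[i] := by
  simp [List.getD, List.getElem?_eq_getElem h]

theorem pv_getD_set_self {α : Type} {l : List α} {i : Nat} (h : i < l.length) (a d : α) :
    (l.set i a).getD i d = a := by
  simp [List.getD, List.getElem?_set_self, h]

theorem pv_getD_set_ne {α : Type} {l : List α} {i j : Nat} (h : i ≠ j) (a d : α) :
    (l.set i a).getD j d = l.getD j d := by
  simp [List.getD, List.getElem?_set_ne h]

theorem pv_getD_replicate {α : Type} {n p : Nat} (h : p < n) (c d : α) :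
    (List.replicate n c).getD p d = c := by
  simp [List.getD, List.getElem?_replicate, h]

theorem pv_foldl_guard_filter {α β : Type} (l : List α) (p : α → Prop) [DecidablePred p]
    (h : β → α → β) (init : β) :
    l.foldl (fun acc x => if p x then h acc x else acc) init
      = (l.filter (fun x => decide (p x))).foldl h init := by
  induction l generalizing init with
  | nil => rfl
  | cons a l ih => by_cases hp : p a <;> simp [List.filter_cons, hp, ih]

theorem pv_foldl_flat {α β γ : Type} (l : List α) (g : α → List β) (f : γ → β → γ) (init : γ) :
    (l.flatMap g).foldl f init = l.foldl (fun acc x => (g x).foldl f acc) init := by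
  induction l generalizing init with
  | nil => rfl
  | cons a l ih => simp [List.flatMap_cons, List.foldl_append, ih]

theorem pv_filter_range_singleton {n i : Nat} (p : Nat → Bool) (hi : i < n)
    (hpi : p i = true) (h : ∀ j, p j = true → j = i) :
    (List.range n).filter p = [i] := by
  induction n with
  | zero => omega
  | succ n ih =>
    rw [List.range_succ, List.filter_append]
    by_cases hin : i = n
    · subst hin
      have h0 : (List.range i).filter p = [] := by
        rw [List.filter_eq_nil_iff]
        intro j hj hpj
        have := h j hpj
        simp [List.mem_range] at hj
        omega
      simp [h0, hpi]
    · have hi' : i < n := by omega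
      have hpn : ¬ p n = true := fun hpn => hin (by have := h n hpn; omega)
      simp [ih hi', hpn]

theorem pv_nodup_flat_pairs (l : List Nat) (hl : l.Nodup) (g : Nat → List Nat)
    (hg : ∀ i, (g i).Nodup) :
    (l.flatMap (fun i => (g i).map (fun j => (i, j)))).Nodup := by
  induction l with
  | nil => simp
  | cons a l ih =>
    simp only [List.flatMap_cons]
    rw [List.nodup_append]
    refine ⟨(hg a).map (fun x y hxy => by simpa using hxy), ih hl.of_cons, ?_⟩
    intro x hx y hy
    obtain ⟨j, hj, rfl⟩ := List.mem_map.mp hx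
    obtain ⟨i, hi, hy2⟩ := List.mem_flatMap.mp hy
    obtain ⟨j', hj', rfl⟩ := List.mem_map.mp hy2
    intro heq
    injection heq with h1 h2
    subst h1
    exact (List.nodup_cons.mp hl).1 hi

theorem pv_foldl_congr {α β : Type} (l : List α) (f g : β → α → β) (init : β)
    (h : ∀ acc : β, ∀ x ∈ l, f acc x = g acc x) : l.foldl f init = l.foldl g init := by
  induction l generalizing init with
  | nil => rfl
  | cons a l ih =>
    simp only [List.foldl_cons]
    rw [h init a List.mem_cons_self]
    exact ih _ (fun acc x hx => h acc x (List.mem_cons_of_mem _ hx))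

-- ---- binarized matrix ----

theorem pv_len_binarize (img : List (List Int)) : (pvBinarize img).length = img.length := by
  simp [pvBinarize]

theorem pv_binEntry (img : List (List Int)) {i j : Nat}
    (hi : i < img.length) (hj : j < img.length) :
    pvEntry (pvBinarize img) i j =
      if i ≠ j then (if 63 < pvEntry img i j then 255 else 0)
      else max 32 (min 128 (pyRoundDiv32 (pvEntry img i j) * 32)) := by
  simp [pvBinarize, pvEntry, List.getD, hi, hj]

theorem pv_diag_pos (img : List (List Int)) {i : Nat} (hi : i < img.length) :
    32 ≤ pvEntry (pvBinarize img) i i ∧ pvEntry (pvBinarize img) i i ≤ 128 := by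
  rw [pv_binEntry img hi hi]
  simp only [ne_eq, not_true_eq_false, if_false]
  constructor <;> omega

-- ---- the two components of pvLoopA ----

def pvCStep (b : List (List Int)) (i : Nat) (c : List (Nat × Nat)) (j : Nat) :
    List (Nat × Nat) :=
  if pvEntry b i j = 255 ∧ i ≠ j then c ++ [(min i j, max i j)] else c

def pvSStep (b : List (List Int)) (i : Nat) (s : List Char) (j : Nat) : List Char :=
  if i = j ∧ pvEntry b i j ≠ 0 then
    s ++ [(PySem.Dict.get? pvCodes (pvEntry b i j)).getD ' '] else s

def pvC (b : List (List Int)) (n : Nat) : List (Nat × Nat) :=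
  (List.range n).foldl (fun c i => (List.range n).foldl (pvCStep b i) c) []

def pvS (b : List (List Int)) (n : Nat) : List Char :=
  (List.range n).foldl (fun s i => (List.range n).foldl (pvSStep b i) s) []

theorem pv_stepA_eq (b : List (List Int)) (i : Nat) (acc : List (Nat × Nat) × List Char)
    (j : Nat) : pvStepA b i acc j = (pvCStep b i acc.1 j, pvSStep b i acc.2 j) := by
  unfold pvStepA pvCStep pvSStep
  simp only []
  by_cases h1 : i = j ∧ pvEntry b i j ≠ 0
  · by_cases h2 : pvEntry b i j = 255 ∧ i ≠ j
    · rw [if_pos h1, if_pos h2, if_pos h2, if_pos h1]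
    · rw [if_pos h1, if_neg h2, if_neg h2, if_pos h1]
  · by_cases h2 : pvEntry b i j = 255 ∧ i ≠ j
    · rw [if_neg h1, if_pos h2, if_pos h2, if_neg h1]
    · rw [if_neg h1, if_neg h2, if_neg h2, if_neg h1]

theorem pv_loopA_eq (b : List (List Int)) (n : Nat) :
    pvLoopA b n = (pvC b n, pvS b n) := by
  unfold pvLoopA pvC pvS
  have hstep : ∀ i, pvStepA b i = fun acc j => (pvCStep b i acc.1 j, pvSStep b i acc.2 j) :=
    fun i => funext fun acc => funext fun j => pv_stepA_eq b i acc j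
  have houter : (fun (acc : List (Nat × Nat) × List Char) (i : Nat) =>
        (List.range n).foldl (pvStepA b i) acc)
      = fun acc i => ((List.range n).foldl (pvCStep b i) acc.1,
                      (List.range n).foldl (pvSStep b i) acc.2) := by
    funext acc i
    rw [hstep i]
    exact PySem.List.foldl_prod_mk (pvCStep b i) (pvSStep b i) (List.range n) acc.1 acc.2
  rw [houter]
  exact PySem.List.foldl_prod_mk
    (fun c i => (List.range n).foldl (pvCStep b i) c)
    (fun s i => (List.range n).foldl (pvSStep b i) s)
    (List.range n) [] []

theorem pv_CStep_fold (b : List (List Int)) (i : Nat) (l : List Nat) (c : List (Nat × Nat)) :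
    l.foldl (pvCStep b i) c
      = c ++ (l.filter (fun j => decide (pvEntry b i j = 255 ∧ i ≠ j))).map
          (fun j => (min i j, max i j)) := by
  induction l generalizing c with
  | nil => simp
  | cons a l ih =>
    rw [List.foldl_cons, List.filter_cons]
    by_cases h : pvEntry b i a = 255 ∧ i ≠ a
    · rw [show pvCStep b i c a = c ++ [(min i a, max i a)] from by
        unfold pvCStep; rw [if_pos h], ih, if_pos (decide_eq_true h)]
      simp
    · rw [show pvCStep b i c a = c from by unfold pvCStep; rw [if_neg h], ih,
        if_neg (by simpa using h)]

theorem pv_SStep_fold (b : List (List Int)) (i : Nat) (l : List Nat) (s : List Char) :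
    l.foldl (pvSStep b i) s
      = s ++ (l.filter (fun j => decide (i = j ∧ pvEntry b i j ≠ 0))).map
          (fun j => (PySem.Dict.get? pvCodes (pvEntry b i j)).getD ' ') := by
  induction l generalizing s with
  | nil => simp
  | cons a l ih =>
    rw [List.foldl_cons, List.filter_cons]
    by_cases h : i = a ∧ pvEntry b i a ≠ 0
    · rw [show pvSStep b i s a = s ++ [(PySem.Dict.get? pvCodes (pvEntry b i a)).getD ' '] from by
        unfold pvSStep; rw [if_pos h], ih, if_pos (decide_eq_true h)]
      simp
    · rw [show pvSStep b i s a = s from by unfold pvSStep; rw [if_neg h], ih,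
        if_neg (by simpa using h)]

-- ---- sequence part ----

theorem pv_char_clamp (k : Int) :
    (PySem.Dict.get? pvCodes (max 32 (min 128 (k * 32)))).getD ' '
      = (['A', 'C', 'G', 'U']).getD
          (((if 4 < (if k < 1 then 1 else k) then 4 else (if k < 1 then 1 else k)) - 1)).toNat ' ' := by
  have h : k ≤ 0 ∨ k = 1 ∨ k = 2 ∨ k = 3 ∨ k = 4 ∨ 5 ≤ k := by omega
  rcases h with h | h | h | h | h | h
  · have h1 : max 32 (min 128 (k * 32)) = 32 := by omega
    have h2 : k < 1 := by omega
    rw [h1]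
    simp only [if_pos h2]
    decide
  · subst h; decide
  · subst h; decide
  · subst h; decide
  · subst h; decide
  · have h1 : max 32 (min 128 (k * 32)) = 128 := by omega
    have h2 : ¬ k < 1 := by omega
    have h3 : (4 : Int) < k := by omega
    rw [h1]
    simp only [if_neg h2, if_pos h3]
    decide

theorem pv_seq_eq (img : List (List Int)) :
    pvS (pvBinarize img) img.length = pvSeqB img := by
  unfold pvS pvSeqB
  have hinner : ∀ s : List Char, ∀ i ∈ List.range img.length,
      (List.range img.length).foldl (pvSStep (pvBinarize img) i) s
      = s ++ [(PySem.Dict.get? pvCodes (pvEntry (pvBinarize img) i i)).getD ' '] := by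
    intro s i hi
    rw [List.mem_range] at hi
    rw [pv_SStep_fold]
    have hflt : (List.range img.length).filter
        (fun j => decide (i = j ∧ pvEntry (pvBinarize img) i j ≠ 0)) = [i] := by
      apply pv_filter_range_singleton _ hi
      · exact decide_eq_true ⟨rfl, by have := pv_diag_pos img hi; omega⟩
      · intro j hj
        exact (of_decide_eq_true hj).1.symm
    rw [hflt]
    simp
  calc (List.range img.length).foldl _ [] =
      (List.range img.length).foldl (fun s i =>
        s ++ [(PySem.Dict.get? pvCodes (pvEntry (pvBinarize img) i i)).getD ' ']) [] := by
        apply pv_foldl_congr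
        intro s i hi
        exact hinner s i hi
    _ = (List.range img.length).map
          (fun i => (PySem.Dict.get? pvCodes (pvEntry (pvBinarize img) i i)).getD ' ') := by
        rw [PySem.List.foldl_append_singleton_eq_map]; simp
    _ = _ := by
        apply List.map_congr_left
        intro i hi
        rw [List.mem_range] at hi
        have hd := pv_binEntry img hi hi
        simp only [ne_eq, not_true_eq_false, if_false] at hd
        rw [hd]
        simpa using pv_char_clamp (pyRoundDiv32 (pvEntry img i i))


-- ---- dot part ----

def pvStepC (d : List Char) (c : Nat × Nat) : List Char :=
  if d.getD c.1 ' ' = '.' ∧ d.getD c.2 ' ' = '.' then (d.set c.1 '(').set c.2 ')' else d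

def pvGood (img : List (List Int)) (c : Nat × Nat) : Prop :=
  c.1 < c.2 ∧ c.2 < img.length ∧ (63 < pvEntry img c.1 c.2 ∨ 63 < pvEntry img c.2 c.1)

-- A's bracket loop is the canonical step on lists of increasing pairs
theorem pv_dotLoopA_eq_stepC (L : List (Nat × Nat)) (n : Nat)
    (hL : ∀ c ∈ L, c.1 < c.2) :
    pvDotLoopA L n = L.foldl pvStepC (List.replicate n '.') := by
  unfold pvDotLoopA
  apply pv_foldl_congr
  intro d c hc
  have hne : c.1 ≠ c.2 := Nat.ne_of_lt (hL c hc)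
  unfold pvDotStepA
  simp only []
  by_cases h1 : d.getD c.1 ' ' = '.'
  · by_cases h2 : d.getD c.2 ' ' = '.'
    · rw [if_neg (not_or_intro (not_not_intro h1) (not_not_intro h2)), if_pos h1]
      have h2' : (d.set c.1 '(').getD c.2 ' ' = '.' := by
        rw [pv_getD_set_ne hne]; exact h2
      rw [if_pos h2']
      unfold pvStepC
      rw [if_pos ⟨h1, h2⟩]
    · rw [if_pos (Or.inr h2)]
      unfold pvStepC
      rw [if_neg (fun hh => h2 hh.2)]
  · rw [if_pos (Or.inl h1)]
    unfold pvStepC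
    rw [if_neg (fun hh => h1 hh.1)]

-- the characterization of the canonical greedy loop on pairwise-disjoint pairs
theorem pv_fold_stepC_char (L : List (Nat × Nat)) (d0 : List Char)
    (hb : ∀ c ∈ L, c.1 < c.2 ∧ c.2 < d0.length)
    (hd : ∀ c ∈ L, d0.getD c.1 ' ' = '.' ∧ d0.getD c.2 ' ' = '.')
    (hp : L.Pairwise (fun c c' => c.1 ≠ c'.1 ∧ c.1 ≠ c'.2 ∧ c.2 ≠ c'.1 ∧ c.2 ≠ c'.2)) :
    (L.foldl pvStepC d0).length = d0.length ∧
    ∀ p : Nat, (L.foldl pvStepC d0).getD p ' ' =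
      if L.any (fun c => c.1 == p) then '(' else
      if L.any (fun c => c.2 == p) then ')' else d0.getD p ' ' := by
  induction L generalizing d0 with
  | nil => simp
  | cons c L ih =>
    have hc := hd c List.mem_cons_self
    have hcb := hb c List.mem_cons_self
    have hne : c.1 ≠ c.2 := Nat.ne_of_lt hcb.1
    have hc1lt : c.1 < d0.length := lt_trans hcb.1 hcb.2
    have hstep : pvStepC d0 c = (d0.set c.1 '(').set c.2 ')' := by
      unfold pvStepC; rw [if_pos ⟨hc.1, hc.2⟩]
    set d1 := (d0.set c.1 '(').set c.2 ')' with hd1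
    have hlen1 : d1.length = d0.length := by simp [hd1]
    have hdisj : ∀ c' ∈ L, c.1 ≠ c'.1 ∧ c.1 ≠ c'.2 ∧ c.2 ≠ c'.1 ∧ c.2 ≠ c'.2 :=
      fun c' hc' => (List.pairwise_cons.mp hp).1 c' hc'
    have hd1getD : ∀ p : Nat, p ≠ c.1 → p ≠ c.2 → d1.getD p ' ' = d0.getD p ' ' := by
      intro p h1 h2
      rw [hd1, pv_getD_set_ne (Ne.symm h2), pv_getD_set_ne (Ne.symm h1)]
    have ihh := ih d1
      (fun c' hc' => by rw [hlen1]; exact hb c' (List.mem_cons_of_mem _ hc'))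
      (fun c' hc' => by
        obtain ⟨n1, n2, n3, n4⟩ := hdisj c' hc'
        have h0 := hd c' (List.mem_cons_of_mem _ hc')
        exact ⟨by rw [hd1getD c'.1 (Ne.symm n1) (Ne.symm n3)]; exact h0.1,
               by rw [hd1getD c'.2 (Ne.symm n2) (Ne.symm n4)]; exact h0.2⟩)
      (List.pairwise_cons.mp hp).2
    rw [List.foldl_cons, hstep]
    refine ⟨by rw [ihh.1, hlen1], ?_⟩
    intro p
    rw [ihh.2 p]
    by_cases hp1 : c.1 = p
    · subst hp1
      have hnos : L.any (fun c' => c'.1 == c.1) = false := by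
        simp only [List.any_eq_false]
        intro c' hc'; simpa using (hdisj c' hc').1.symm
      have hnos2 : L.any (fun c' => c'.2 == c.1) = false := by
        simp only [List.any_eq_false]
        intro c' hc'; simpa using (hdisj c' hc').2.1.symm
      have hval : d1.getD c.1 ' ' = '(' := by
        rw [hd1, pv_getD_set_ne (Ne.symm hne), pv_getD_set_self hc1lt]
      simp [hnos, hnos2]
      simpa using hval
    · by_cases hp2 : c.2 = p
      · subst hp2
        have hnos : L.any (fun c' => c'.1 == c.2) = false := by
          simp only [List.any_eq_false]
          intro c' hc'; simpa using (hdisj c' hc').2.2.1.symm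
        have hnos2 : L.any (fun c' => c'.2 == c.2) = false := by
          simp only [List.any_eq_false]
          intro c' hc'; simpa using (hdisj c' hc').2.2.2.symm
        have hpc1 : (c.1 == c.2) = false := by simpa using hne
        have hval : d1.getD c.2 ' ' = ')' := by
          rw [hd1, pv_getD_set_self (by rw [List.length_set]; exact hcb.2)]
        simp [hnos, hnos2, hpc1]
        simpa using hval
      · have e1 : (c.1 == p) = false := by simpa using hp1
        have e2 : (c.2 == p) = false := by simpa using hp2
        simp only [List.any_cons, e1, e2, Bool.false_or]
        rw [hd1getD p (fun h => hp1 h.symm) (fun h => hp2 h.symm)]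

-- A's coords list as a flatMap, and its membership
theorem pv_pvC_eq_flatMap (b : List (List Int)) (n : Nat) :
    pvC b n = (List.range n).flatMap (fun i =>
      ((List.range n).filter (fun j => decide (pvEntry b i j = 255 ∧ i ≠ j))).map
        (fun j => (min i j, max i j))) := by
  unfold pvC
  rw [pv_foldl_congr _ _
    (fun c i => c ++ ((List.range n).filter
        (fun j => decide (pvEntry b i j = 255 ∧ i ≠ j))).map (fun j => (min i j, max i j))) _
    (fun acc i _ => pv_CStep_fold b i (List.range n) acc)]
  rw [PySem.List.foldl_append_eq_flatMap]
  simp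

theorem pv_mem_pvC (img : List (List Int)) (c : Nat × Nat) :
    c ∈ pvC (pvBinarize img) img.length ↔ pvGood img c := by
  rw [pv_pvC_eq_flatMap]
  unfold pvGood
  constructor
  · intro h
    simp only [List.mem_flatMap, List.mem_map, List.mem_filter, List.mem_range,
      decide_eq_true_eq] at h
    obtain ⟨i, hi, j, ⟨hj, hcond, hij⟩, rfl⟩ := h
    have hact : 63 < pvEntry img i j := by
      have hbe := pv_binEntry img hi hj
      rw [if_pos hij] at hbe
      by_contra hno
      rw [hbe, if_neg hno] at hcond
      exact absurd hcond (by decide)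
    rcases Nat.lt_or_ge i j with hlt | hge
    · have hmin : min i j = i := by omega
      have hmax : max i j = j := by omega
      refine ⟨?_, ?_, Or.inl ?_⟩
      · show min i j < max i j; omega
      · show max i j < img.length; omega
      · show 63 < pvEntry img (min i j) (max i j)
        rw [hmin, hmax]; exact hact
    · have hlt : j < i := by omega
      have hmin : min i j = j := by omega
      have hmax : max i j = i := by omega
      refine ⟨?_, ?_, Or.inr ?_⟩
      · show min i j < max i j; omega
      · show max i j < img.length; omega
      · show 63 < pvEntry img (max i j) (min i j)
        rw [hmin, hmax]; exact hact
  · intro h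
    obtain ⟨h12, h2n, hact⟩ := h
    simp only [List.mem_flatMap, List.mem_map, List.mem_filter, List.mem_range,
      decide_eq_true_eq]
    rcases hact with hact | hact
    · refine ⟨c.1, by omega, c.2, ⟨by omega, ?_, by omega⟩, ?_⟩
      · rw [pv_binEntry img (by omega) (by omega), if_pos (by omega : c.1 ≠ c.2), if_pos hact]
      · have hmin : min c.1 c.2 = c.1 := by omega
        have hmax : max c.1 c.2 = c.2 := by omega
        rw [hmin, hmax]
    · refine ⟨c.2, by omega, c.1, ⟨by omega, ?_, by omega⟩, ?_⟩
      · rw [pv_binEntry img (by omega) (by omega), if_pos (by omega : c.2 ≠ c.1), if_pos hact]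
      · have hmin : min c.2 c.1 = c.1 := by omega
        have hmax : max c.2 c.1 = c.2 := by omega
        rw [hmin, hmax]

-- B's upper-triangle pair list and its bracket loop
def pvLP (n : Nat) : List (Nat × Nat) :=
  (List.range n).flatMap (fun i => (List.range' (i + 1) (n - (i + 1))).map (fun j => (i, j)))

theorem pv_dotStepB_eq (img : List (List Int)) (i : Nat) (d : List Char) (j : Nat) :
    pvDotStepB img i d j =
      if (63 < pvEntry img i j ∨ 63 < pvEntry img j i) then pvStepC d (i, j) else d := by
  unfold pvDotStepB pvStepC pvEntry
  by_cases ha : (63 < (img.getD i []).getD j 0 ∨ 63 < (img.getD j []).getD i 0)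
  · by_cases hb2 : (d.getD i ' ' = '.' ∧ d.getD j ' ' = '.')
    · rw [if_pos ⟨ha, hb2.1, hb2.2⟩, if_pos ha, if_pos hb2]
    · rw [if_neg (fun hh => hb2 ⟨hh.2.1, hh.2.2⟩), if_pos ha, if_neg hb2]
  · rw [if_neg (fun hh => ha hh.1), if_neg ha]

theorem pv_dotB_eq (img : List (List Int)) :
    pvDotB img = ((pvLP img.length).filter
      (fun c => decide (63 < pvEntry img c.1 c.2 ∨ 63 < pvEntry img c.2 c.1))).foldl
        pvStepC (List.replicate img.length '.') := by
  unfold pvDotB pvLP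
  rw [pv_foldl_congr _ _
    (fun (dot : List Char) (i : Nat) =>
      ((List.range' (i + 1) (img.length - (i + 1))).map (fun j => (i, j))).foldl
        (fun (d : List Char) (c : Nat × Nat) =>
          if (63 < pvEntry img c.1 c.2 ∨ 63 < pvEntry img c.2 c.1) then pvStepC d c else d)
        dot) _
    (fun dot i _ => by
      simp only []
      rw [List.foldl_map]
      exact pv_foldl_congr _ _ _ dot (fun d j _ => pv_dotStepB_eq img i d j))]
  rw [← pv_foldl_flat]
  rw [pv_foldl_guard_filter]

theorem pv_mem_LB (img : List (List Int)) (c : Nat × Nat) :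
    c ∈ (pvLP img.length).filter
        (fun c => decide (63 < pvEntry img c.1 c.2 ∨ 63 < pvEntry img c.2 c.1))
      ↔ pvGood img c := by
  unfold pvLP pvGood
  simp only [List.mem_filter, List.mem_flatMap, List.mem_map, List.mem_range,
    List.mem_range'_1, decide_eq_true_eq]
  constructor
  · rintro ⟨⟨i, hi, j, hj, rfl⟩, hact⟩
    exact ⟨by omega, by omega, hact⟩
  · rintro ⟨h1, h2, hact⟩
    exact ⟨⟨c.1, by omega, c.2, by omega, rfl⟩, hact⟩

theorem pv_nodup_LB (img : List (List Int)) :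
    ((pvLP img.length).filter
      (fun c => decide (63 < pvEntry img c.1 c.2 ∨ 63 < pvEntry img c.2 c.1))).Nodup := by
  apply List.Nodup.filter
  unfold pvLP
  exact pv_nodup_flat_pairs _ (List.nodup_range) _ (fun i => List.nodup_range')

-- Pre_'s disjointness in pair form
theorem pv_pairwise_of_pre (img : List (List Int))
    (hdisj : ∀ i ∈ List.range img.length, ∀ j ∈ List.range img.length,
      ∀ k ∈ List.range img.length, ∀ l ∈ List.range img.length,
      i < j → k < l → (i, j) ≠ (k, l) → pvActive img i j = true → pvActive img k l = true →
      i ≠ k ∧ i ≠ l ∧ j ≠ k ∧ j ≠ l)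
    (L : List (Nat × Nat)) (hnd : L.Nodup) (hg : ∀ c ∈ L, pvGood img c) :
    L.Pairwise (fun c c' => c.1 ≠ c'.1 ∧ c.1 ≠ c'.2 ∧ c.2 ≠ c'.1 ∧ c.2 ≠ c'.2) := by
  apply hnd.imp_of_mem
  intro c c' hc hc' hne
  obtain ⟨g1, g2, g3⟩ := hg c hc
  obtain ⟨g1', g2', g3'⟩ := hg c' hc'
  have ha : pvActive img c.1 c.2 = true := by
    simp only [pvActive, Bool.or_eq_true, decide_eq_true_eq]
    exact g3
  have ha' : pvActive img c'.1 c'.2 = true := by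
    simp only [pvActive, Bool.or_eq_true, decide_eq_true_eq]
    exact g3'
  have hpairs : (c.1, c.2) ≠ (c'.1, c'.2) := by
    intro h
    apply hne
    obtain ⟨e1, e2⟩ := Prod.mk.injEq _ _ _ _ ▸ h
    exact Prod.ext e1 e2
  exact hdisj c.1 (List.mem_range.mpr (by omega)) c.2 (List.mem_range.mpr (by omega))
    c'.1 (List.mem_range.mpr (by omega)) c'.2 (List.mem_range.mpr (by omega))
    g1 g1' hpairs ha ha'

theorem pv_dot_eq (img : List (List Int))
    (hdisj : ∀ i ∈ List.range img.length, ∀ j ∈ List.range img.length,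
      ∀ k ∈ List.range img.length, ∀ l ∈ List.range img.length,
      i < j → k < l → (i, j) ≠ (k, l) → pvActive img i j = true → pvActive img k l = true →
      i ≠ k ∧ i ≠ l ∧ j ≠ k ∧ j ≠ l) :
    pvDotLoopA (PySem.Set.ofList (pvC (pvBinarize img) img.length)) img.length = pvDotB img := by
  set LA := PySem.Set.ofList (pvC (pvBinarize img) img.length) with hLA
  set LB := (pvLP img.length).filter
      (fun c => decide (63 < pvEntry img c.1 c.2 ∨ 63 < pvEntry img c.2 c.1)) with hLB
  have hmemA : ∀ c, c ∈ LA ↔ pvGood img c := by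
    intro c; rw [hLA, PySem.Set.mem_ofList, pv_mem_pvC]
  have hmemB : ∀ c, c ∈ LB ↔ pvGood img c := fun c => pv_mem_LB img c
  have hgA : ∀ c ∈ LA, pvGood img c := fun c hc => (hmemA c).mp hc
  have hgB : ∀ c ∈ LB, pvGood img c := fun c hc => (hmemB c).mp hc
  rw [pv_dotLoopA_eq_stepC LA img.length (fun c hc => (hgA c hc).1), pv_dotB_eq]
  have hlenr : (List.replicate img.length '.').length = img.length := List.length_replicate
  have hbA : ∀ c ∈ LA, c.1 < c.2 ∧ c.2 < (List.replicate img.length '.').length := by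
    intro c hc; obtain ⟨g1, g2, _⟩ := hgA c hc; exact ⟨g1, by omega⟩
  have hbB : ∀ c ∈ LB, c.1 < c.2 ∧ c.2 < (List.replicate img.length '.').length := by
    intro c hc; obtain ⟨g1, g2, _⟩ := hgB c hc; exact ⟨g1, by omega⟩
  have hdA : ∀ c ∈ LA, (List.replicate img.length '.').getD c.1 ' ' = '.' ∧
      (List.replicate img.length '.').getD c.2 ' ' = '.' := by
    intro c hc; obtain ⟨g1, g2, _⟩ := hgA c hc
    exact ⟨pv_getD_replicate (by omega) _ _, pv_getD_replicate (by omega) _ _⟩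
  have hdB : ∀ c ∈ LB, (List.replicate img.length '.').getD c.1 ' ' = '.' ∧
      (List.replicate img.length '.').getD c.2 ' ' = '.' := by
    intro c hc; obtain ⟨g1, g2, _⟩ := hgB c hc
    exact ⟨pv_getD_replicate (by omega) _ _, pv_getD_replicate (by omega) _ _⟩
  have hpA := pv_pairwise_of_pre img hdisj LA (PySem.Set.nodup_ofList _) hgA
  have hpB := pv_pairwise_of_pre img hdisj LB (pv_nodup_LB img) hgB
  have chA := pv_fold_stepC_char LA _ hbA hdA hpA
  have chB := pv_fold_stepC_char LB _ hbB hdB hpB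
  have hany1 : ∀ p : Nat, LA.any (fun c => c.1 == p) = LB.any (fun c => c.1 == p) := by
    intro p
    rw [Bool.eq_iff_iff]
    simp only [List.any_eq_true, beq_iff_eq]
    constructor
    · rintro ⟨c, hc, hcp⟩; exact ⟨c, (hmemB c).mpr ((hmemA c).mp hc), hcp⟩
    · rintro ⟨c, hc, hcp⟩; exact ⟨c, (hmemA c).mpr ((hmemB c).mp hc), hcp⟩
  have hany2 : ∀ p : Nat, LA.any (fun c => c.2 == p) = LB.any (fun c => c.2 == p) := by
    intro p
    rw [Bool.eq_iff_iff]
    simp only [List.any_eq_true, beq_iff_eq]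
    constructor
    · rintro ⟨c, hc, hcp⟩; exact ⟨c, (hmemB c).mpr ((hmemA c).mp hc), hcp⟩
    · rintro ⟨c, hc, hcp⟩; exact ⟨c, (hmemA c).mpr ((hmemB c).mp hc), hcp⟩
  apply List.ext_getElem (by rw [chA.1, chB.1])
  intro p hp1 hp2
  rw [← pv_getD_eq_getElem hp1 ' ', ← pv_getD_eq_getElem hp2 ' ', chA.2 p, chB.2 p,
    hany1 p, hany2 p]

-- ===== VERDICT (by name: the statement is the Claim_ definition above) =====
theorem img2dot_spec : Claim_equal_img2dot := by
  intro img _hdom hpre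
  obtain ⟨_hsq, hdisj⟩ := hpre
  unfold Spec_img2dot
  show img2dot img = img2dot_alt img
  unfold img2dot img2dot_alt
  simp only [pv_len_binarize, pv_loopA_eq]
  rw [pv_seq_eq, pv_dot_eq img hdisj]
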